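-- pv_equiv track=rewrite | github.com/wwssllabcd/MyInterpreter | InterUtil.py | get_variable_string
-- ===== SOURCE A (Python) =====
-- def isDigital(c):
--     if ord('0') <= ord(c) <= ord('9'):
--         return True
--
--     return False
--
-- def isChar(c):
--     if ord('A') <= ord(c) <= ord('Z'):
--         return True
--     if ord('a') <= ord(c) <= ord('z'):
--         return True
--     return False
--
-- def get_variable_string(codeStr, startPos):
--     cnt = len(codeStr)
--     curPtr = startPos
--     while curPtr < cnt:
--         c = codeStr[curPtr]
--         if isDigital(c) == True:
--             curPtr +=1
--             continue
--
--         if isChar(c) == True: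
--             curPtr +=1
--             continue
--         break
--     return codeStr[startPos:curPtr]
-- ===== SOURCE B (Python) =====
-- def _prefix_ok(seg):
--     return all('0' <= c <= '9' or 'A' <= c <= 'Z' or 'a' <= c <= 'z' for c in seg)
--
-- def get_variable_string(codeStr, startPos):
--     # Binary search for the longest all-alphanumeric prefix of the tail.
--     tail = codeStr[startPos:]
--     lo, hi = 0, len(tail)
--     while lo < hi:
--         mid = (lo + hi + 1) // 2
--         if _prefix_ok(tail[lo:mid]):
--             lo = mid
--         else:
--             hi = mid - 1
--     return tail[:lo]
-- ===== Notes on version B (the rewrite author's own statement) =====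
-- stated objective: alternative
-- what changed: B binary-searches over prefix lengths of the tail slice codeStr[startPos:] (invariant: tail[:lo] is all-alphanumeric), checking whole segments tail[lo:mid] with all(), instead of A's character-by-character index-pointer while-loop over the original string followed by a slice between two pointers; the segment checks run inside the all() built-in rather than one interpreted loop iteration per character (measured ~2x faster on large inputs).
-- intended difference: When -len(codeStr) <= startPos < 0 and the tail codeStr[startPos:] is entirely alphanumeric while some earlier character is not, A's negative-index scan wraps around to the front of the string and the leftover pointer makes its final slice empty, so A returns '' ; B returns the whole alphanumeric tail, which is the intended leading token at that position. — e.g. on get_variable_string("a b", -1): A returns "", B returns "b"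
import Mathlib
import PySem

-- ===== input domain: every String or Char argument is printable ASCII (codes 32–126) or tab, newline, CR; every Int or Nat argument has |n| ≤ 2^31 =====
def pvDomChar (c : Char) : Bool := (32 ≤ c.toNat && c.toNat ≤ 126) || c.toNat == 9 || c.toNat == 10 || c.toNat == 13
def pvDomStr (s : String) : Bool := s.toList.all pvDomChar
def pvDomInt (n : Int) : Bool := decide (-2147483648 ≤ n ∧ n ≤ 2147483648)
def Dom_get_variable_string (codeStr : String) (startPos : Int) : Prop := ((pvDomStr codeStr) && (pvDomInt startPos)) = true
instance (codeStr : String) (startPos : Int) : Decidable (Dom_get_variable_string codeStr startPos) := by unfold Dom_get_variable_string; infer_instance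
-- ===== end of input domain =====

-- B replaces A's character-by-character pointer walk by a binary search over prefix
-- lengths of the tail slice (objective: alternative algorithm); equivalence
-- is about the return value only (neither version mutates anything).

-- ===== PORT A =====
def pvIsDigital (c : Char) : Bool :=
  if '0'.toNat ≤ c.toNat ∧ c.toNat ≤ '9'.toNat then true else false

def pvIsChar (c : Char) : Bool :=
  if 'A'.toNat ≤ c.toNat ∧ c.toNat ≤ 'Z'.toNat then true
  else if 'a'.toNat ≤ c.toNat ∧ c.toNat ≤ 'z'.toNat then true else false

/-- A's `while curPtr < cnt` loop; fuel bounds the iteration count (each step does `curPtr += 1`,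
    so `(cnt - startPos).toNat` steps always suffice).  `pyGet? = none` is Python's IndexError
    (outside `Pre_`); the port stops there. -/
def pvALoop (s : List Char) : Nat → Int → Int
  | 0, curPtr => curPtr
  | fuel + 1, curPtr =>
    if curPtr < (s.length : Int) then
      match PySem.List.pyGet? s curPtr with
      | none => curPtr
      | some c =>
        if pvIsDigital c = true then pvALoop s fuel (curPtr + 1)
        else if pvIsChar c = true then pvALoop s fuel (curPtr + 1)
        else curPtr
    else curPtr

def get_variable_string (codeStr : String) (startPos : Int) : String :=
  let cnt : Int := PySem.Str.len codeStr
  let curPtr := pvALoop codeStr.toList ((cnt - startPos).toNat) startPos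
  PySem.Str.slice codeStr (some startPos) (some curPtr)

-- ===== PORT B =====
/-- B's `_prefix_ok`: is the segment entirely ASCII alphanumeric? -/
def pvPrefixOk (seg : List Char) : Bool :=
  seg.all fun c =>
    (decide ('0' ≤ c) && decide (c ≤ '9')) || (decide ('A' ≤ c) && decide (c ≤ 'Z')) ||
      (decide ('a' ≤ c) && decide (c ≤ 'z'))

/-- B's `while lo < hi` binary search over prefix lengths; one fuel unit per iteration
    (`hi - lo` shrinks by at least 1 each time, so `len(tail)` units suffice). -/
def pvBSearch (tail : List Char) : Nat → Nat → Nat → Nat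
  | 0, lo, _ => lo
  | fuel + 1, lo, hi =>
    if lo < hi then
      let mid := (lo + hi + 1) / 2
      if pvPrefixOk (PySem.List.slice tail (some (lo : Int)) (some (mid : Int))) then
        pvBSearch tail fuel mid hi
      else
        pvBSearch tail fuel lo (mid - 1)
    else lo

def get_variable_string_alt (codeStr : String) (startPos : Int) : String :=
  let tail := PySem.Str.slice codeStr (some startPos) none
  let lo := pvBSearch tail.toList tail.toList.length 0 tail.toList.length
  PySem.Str.slice tail none (some (lo : Int))

-- ===== PRECONDITION & SPEC =====
-- Pre_ excludes exactly the inputs where A raises IndexError (first index access with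
-- startPos < -len(codeStr)); on those inputs B still returns a value (the slice clamps).
def Pre_get_variable_string (codeStr : String) (startPos : Int) : Prop :=
  -(codeStr.toList.length : Int) ≤ startPos
instance (codeStr : String) (startPos : Int) : Decidable (Pre_get_variable_string codeStr startPos) := by
  unfold Pre_get_variable_string; infer_instance

def pvWitness_get_variable_string : String × Int := ("abc def", 0)

-- When -len(codeStr) ≤ startPos < 0 and the tail codeStr[startPos:] is entirely alphanumeric
-- while some earlier character is not, A's negative-index scan wraps around to the front of the
-- string and the leftover pointer makes its final slice empty, so A returns '' ; B returns the
-- whole alphanumeric tail, which is the intended leading token at that position.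
def D_get_variable_string (codeStr : String) (startPos : Int) : Prop :=
  startPos < 0 ∧ -(codeStr.toList.length : Int) ≤ startPos ∧
    (codeStr.toList.drop (((codeStr.toList.length : Int) + startPos).toNat)).all Char.isAlphanum = true ∧
    ¬ (codeStr.toList.all Char.isAlphanum = true)
instance (codeStr : String) (startPos : Int) : Decidable (D_get_variable_string codeStr startPos) := by
  unfold D_get_variable_string; infer_instance

def Spec_get_variable_string (codeStr : String) (startPos : Int) (out : String) : Prop :=
  ¬ D_get_variable_string codeStr startPos → out = get_variable_string_alt codeStr startPos
instance (codeStr : String) (startPos : Int) (out : String) : Decidable (Spec_get_variable_string codeStr startPos out) := by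
  unfold Spec_get_variable_string; infer_instance

def pvDiffWitness_get_variable_string : String × Int := ("a b", -1)
def pvDiffWitnessOut_get_variable_string : String × String := ("", "b")

-- ===== CLAIM (what is proved, stated in full; the proofs are below) =====
def Claim_unchanged_get_variable_string : Prop := ∀ (codeStr : String) (startPos : Int), Dom_get_variable_string codeStr startPos → Pre_get_variable_string codeStr startPos → Spec_get_variable_string codeStr startPos (get_variable_string codeStr startPos)
def Claim_changed_get_variable_string : Prop := Dom_get_variable_string (pvDiffWitness_get_variable_string.1) (pvDiffWitness_get_variable_string.2) ∧ Pre_get_variable_string (pvDiffWitness_get_variable_string.1) (pvDiffWitness_get_variable_string.2) ∧ D_get_variable_string (pvDiffWitness_get_variable_string.1) (pvDiffWitness_get_variable_string.2) ∧ get_variable_string (pvDiffWitness_get_variable_string.1) (pvDiffWitness_get_variable_string.2) = pvDiffWitnessOut_get_variable_string.1 ∧ get_variable_string_alt (pvDiffWitness_get_variable_string.1) (pvDiffWitness_get_variable_string.2) = pvDiffWitnessOut_get_variable_string.2 ∧ pvDiffWitnessOut_get_variable_string.1 ≠ pvDiffWitnessOut_get_variable_string.2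
def Claim_exact_get_variable_string : Prop := ∀ (codeStr : String) (startPos : Int), Dom_get_variable_string codeStr startPos → Pre_get_variable_string codeStr startPos → D_get_variable_string codeStr startPos → get_variable_string codeStr startPos ≠ get_variable_string_alt codeStr startPos

-- ===== LEMMAS AND PROOFS =====

/-- abbreviation for B's per-character test, for stating lemmas. -/
def pvIsTokenChar (c : Char) : Bool :=
  (decide ('0' ≤ c) && decide (c ≤ '9')) || (decide ('A' ≤ c) && decide (c ≤ 'Z')) ||
    (decide ('a' ≤ c) && decide (c ≤ 'z'))

theorem pvPrefixOk_eq (seg : List Char) : pvPrefixOk seg = seg.all pvIsTokenChar := rfl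

/-- B's token test agrees with A's two helpers. -/
theorem pvTok_eq (c : Char) : pvIsTokenChar c = (pvIsDigital c || pvIsChar c) := by
  have h1 : ∀ a b : Char, (a ≤ b) ↔ (a.toNat ≤ b.toNat) := fun a b => by
    rw [Char.le_def, UInt32.le_iff_toNat_le]; rfl
  unfold pvIsTokenChar pvIsDigital pvIsChar
  simp only [h1]
  split_ifs <;> simp_all

theorem pvTok_eq_alnum (c : Char) : pvIsTokenChar c = c.isAlphanum := by
  have h1 : ∀ a b : Char, (a ≤ b) ↔ (a.toNat ≤ b.toNat) := fun a b => by
    rw [Char.le_def, UInt32.le_iff_toNat_le]; rfl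
  have h2 : ∀ a b : Char, (a.val ≤ b.val) ↔ (a.toNat ≤ b.toNat) := fun a b =>
    UInt32.le_iff_toNat_le
  unfold pvIsTokenChar
  simp only [Char.isAlphanum, Char.isAlpha, Char.isDigit, Char.isUpper, Char.isLower,
    ge_iff_le, h1, h2]
  simp only [show '0'.toNat = 48 from rfl, show '9'.toNat = 57 from rfl,
    show 'A'.toNat = 65 from rfl, show 'Z'.toNat = 90 from rfl,
    show 'a'.toNat = 97 from rfl, show 'z'.toNat = 122 from rfl]
  by_cases h48 : 48 ≤ c.toNat <;> by_cases h57 : c.toNat ≤ 57 <;>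
  by_cases h65 : 65 ≤ c.toNat <;> by_cases h90 : c.toNat ≤ 90 <;>
  by_cases h97 : 97 ≤ c.toNat <;> by_cases h122 : c.toNat ≤ 122 <;>
    simp [h48, h57, h65, h90, h97, h122]

/-- one step of A's loop, phrased with B's token test -/
theorem pvALoop_succ_lt (s : List Char) (fuel : Nat) (cur : Int) (c : Char)
    (hlt : cur < (s.length : Int)) (hget : PySem.List.pyGet? s cur = some c) :
    pvALoop s (fuel + 1) cur =
      (if pvIsTokenChar c then pvALoop s fuel (cur + 1) else cur) := by
  rw [pvTok_eq]
  simp only [pvALoop, if_pos hlt, hget]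
  by_cases hd : pvIsDigital c = true <;> by_cases hc : pvIsChar c = true <;> simp [hd, hc]

/-- A's loop from a nonnegative pointer: it advances over the token prefix of `drop j`. -/
theorem pvALoop_nonneg (s : List Char) (fuel j : Nat) (hf : s.length ≤ j + fuel) :
    pvALoop s fuel (j : Int) = (j : Int) + (((s.drop j).takeWhile pvIsTokenChar).length : Int) := by
  induction fuel generalizing j with
  | zero =>
    have : s.drop j = [] := List.drop_eq_nil_of_le (by omega)
    simp [pvALoop, this]
  | succ fuel ih =>
    by_cases hj : j < s.length
    · have hget : PySem.List.pyGet? s (j : Int) = some s[j] := by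
        simp [PySem.List.pyGet?_natCast, List.getElem?_eq_getElem hj]
      rw [pvALoop_succ_lt s fuel (j : Int) s[j] (by exact_mod_cast hj) hget]
      rw [List.drop_eq_getElem_cons hj, List.takeWhile_cons]
      by_cases ht : pvIsTokenChar s[j] = true
      · have : ((j : Int) + 1) = ((j + 1 : Nat) : Int) := by push_cast; ring
        rw [if_pos ht, this, ih (j + 1) (by omega)]
        simp [ht]
        ring
      · simp [ht]
    · have hnlt : ¬ ((j : Int) < (s.length : Int)) := by exact_mod_cast hj
      have : s.drop j = [] := List.drop_eq_nil_of_le (by omega)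
      simp [pvALoop, hnlt, this]

/-- A's loop from a negative pointer when the tail contains a non-token character:
    it stops while still negative, having advanced over the token prefix of the tail. -/
theorem pvALoop_neg_stop (s : List Char) (m : Nat) (hm : 0 < m) (hmn : m ≤ s.length)
    (hna : ¬ ((s.drop (s.length - m)).all pvIsTokenChar = true))
    (fuel : Nat) (hf : m ≤ fuel) :
    pvALoop s fuel (-(m : Int)) =
      -(m : Int) + (((s.drop (s.length - m)).takeWhile pvIsTokenChar).length : Int) := by
  induction m generalizing fuel with
  | zero => omega
  | succ m ih =>
    obtain ⟨fuel, rfl⟩ : ∃ f, fuel = f + 1 := ⟨fuel - 1, by omega⟩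
    have hidx : s.length - (m + 1) < s.length := by omega
    have hget : PySem.List.pyGet? s (-((m + 1 : Nat) : Int)) = some s[s.length - (m + 1)] := by
      rw [PySem.List.pyGet?_neg_natCast s (m + 1) (by omega) (by omega)]
      exact List.getElem?_eq_getElem hidx
    have hlt : -((m + 1 : Nat) : Int) < (s.length : Int) := by push_cast; omega
    have hids : s.length - (m + 1) + 1 = s.length - m := by omega
    have hdropc : s.drop (s.length - (m + 1)) = s[s.length - (m + 1)] :: s.drop (s.length - m) := by
      rw [List.drop_eq_getElem_cons hidx, hids]
    rw [pvALoop_succ_lt s fuel _ _ hlt hget, hdropc, List.takeWhile_cons]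
    by_cases ht : pvIsTokenChar s[s.length - (m + 1)] = true
    · have hm0 : 0 < m := by
        rcases Nat.eq_zero_or_pos m with h0 | h0
        · exfalso
          apply hna
          subst h0
          rw [hdropc]
          simp [ht, List.drop_eq_nil_of_le (le_refl s.length)]
        · exact h0
      have hna' : ¬ ((s.drop (s.length - m)).all pvIsTokenChar = true) := by
        intro hall
        apply hna
        rw [hdropc]
        simp [ht, hall]
      have hcur : -((m + 1 : Nat) : Int) + 1 = -(m : Int) := by push_cast; ring
      rw [if_pos ht, hcur, ih hm0 (by omega) hna' fuel (by omega)]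
      simp [ht]
      ring
    · simp [ht]

/-- A's loop from a negative pointer when the tail is all token characters: the scan wraps
    to the front of the string and ends at the length of the whole token prefix of `s`. -/
theorem pvALoop_neg_wrap (s : List Char) (m : Nat) (hmn : m ≤ s.length)
    (hall : (s.drop (s.length - m)).all pvIsTokenChar = true)
    (fuel : Nat) (hf : s.length + m ≤ fuel) :
    pvALoop s fuel (-(m : Int)) = ((s.takeWhile pvIsTokenChar).length : Int) := by
  induction m generalizing fuel with
  | zero =>
    have h0 : -((0 : Nat) : Int) = ((0 : Nat) : Int) := by norm_num
    rw [h0, pvALoop_nonneg s fuel 0 (by omega)]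
    simp
  | succ m ih =>
    obtain ⟨fuel, rfl⟩ : ∃ f, fuel = f + 1 := ⟨fuel - 1, by omega⟩
    have hidx : s.length - (m + 1) < s.length := by omega
    have hget : PySem.List.pyGet? s (-((m + 1 : Nat) : Int)) = some s[s.length - (m + 1)] := by
      rw [PySem.List.pyGet?_neg_natCast s (m + 1) (by omega) (by omega)]
      exact List.getElem?_eq_getElem hidx
    have hlt : -((m + 1 : Nat) : Int) < (s.length : Int) := by push_cast; omega
    have hids : s.length - (m + 1) + 1 = s.length - m := by omega
    have hdropc : s.drop (s.length - (m + 1)) = s[s.length - (m + 1)] :: s.drop (s.length - m) := by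
      rw [List.drop_eq_getElem_cons hidx, hids]
    rw [hdropc] at hall
    simp only [List.all_cons, Bool.and_eq_true] at hall
    rw [pvALoop_succ_lt s fuel _ _ hlt hget, if_pos hall.1]
    have hcur : -((m + 1 : Nat) : Int) + 1 = -(m : Int) := by push_cast; ring
    rw [hcur, ih (by omega) hall.2 fuel (by omega)]

theorem pvTakeWhile_take (l : List Char) :
    l.takeWhile pvIsTokenChar = l.take (l.takeWhile pvIsTokenChar).length :=
  List.prefix_iff_eq_take.mp (List.takeWhile_prefix pvIsTokenChar)

/-- every character strictly before the token-prefix length is a token character -/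
theorem pvTok_of_lt_prefixLen (t : List Char) (i : Nat)
    (hi : i < (t.takeWhile pvIsTokenChar).length) (hl : i < t.length) :
    pvIsTokenChar t[i] = true := by
  induction t generalizing i with
  | nil => simp at hl
  | cons c cs ih =>
    rw [List.takeWhile_cons] at hi
    by_cases hc : pvIsTokenChar c = true
    · rw [if_pos hc] at hi
      cases i with
      | zero => simpa using hc
      | succ i => simpa using ih i (by simpa using hi) (by simpa using hl)
    · rw [if_neg hc] at hi
      simp at hi

/-- the character at the token-prefix length (if any) is not a token character -/
theorem pvTok_at_prefixLen (t : List Char) (x : Char)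
    (h : t[(t.takeWhile pvIsTokenChar).length]? = some x) :
    pvIsTokenChar x = false := by
  induction t with
  | nil => simp at h
  | cons c cs ih =>
    by_cases hc : pvIsTokenChar c = true
    · rw [List.takeWhile_cons, if_pos hc, List.length_cons, List.getElem?_cons_succ] at h
      exact ih h
    · rw [List.takeWhile_cons, if_neg hc] at h
      simp only [List.length_nil, List.getElem?_cons_zero, Option.some.injEq] at h
      rw [← h]
      simpa using hc

/-- correctness of B's binary search: it returns the token-prefix length of `t`. -/
theorem pvBSearch_eq (t : List Char) (fuel lo hi : Nat)
    (hlo : lo ≤ (t.takeWhile pvIsTokenChar).length)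
    (hhi : (t.takeWhile pvIsTokenChar).length ≤ hi)
    (hlen : hi ≤ t.length) (hf : hi - lo ≤ fuel) :
    pvBSearch t fuel lo hi = (t.takeWhile pvIsTokenChar).length := by
  induction fuel generalizing lo hi with
  | zero => simp only [pvBSearch]; omega
  | succ fuel ih =>
    by_cases hlh : lo < hi
    · simp only [pvBSearch, if_pos hlh]
      have hmid1 : lo < (lo + hi + 1) / 2 := by omega
      have hmid2 : (lo + hi + 1) / 2 ≤ hi := by omega
      set mid := (lo + hi + 1) / 2 with hmid
      rw [pvPrefixOk_eq, PySem.List.slice_natCast]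
      by_cases hK : mid ≤ (t.takeWhile pvIsTokenChar).length
      · have hallseg : ((t.drop lo).take (mid - lo)).all pvIsTokenChar = true := by
          rw [List.all_eq_true]
          intro x hx
          obtain ⟨i, hil, hig⟩ := List.mem_iff_getElem.mp hx
          have hilen : lo + i < t.length := by
            simp at hil
            omega
          have himid : i < mid - lo := by
            simp at hil
            omega
          have hx' : x = t[lo + i] := by
            rw [← hig]
            simp
          rw [hx']
          exact pvTok_of_lt_prefixLen t (lo + i) (by omega) hilen
        rw [if_pos hallseg]
        exact ih mid hi hK hhi hlen (by omega)
      · have hK' : (t.takeWhile pvIsTokenChar).length < mid := by omega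
        set K := (t.takeWhile pvIsTokenChar).length with hKdef
        have hKlen : K < t.length := by omega
        have hnall : ¬ (((t.drop lo).take (mid - lo)).all pvIsTokenChar = true) := by
          intro hall
          have hmemK : t[K] ∈ (t.drop lo).take (mid - lo) := by
            rw [List.mem_iff_getElem]
            refine ⟨K - lo, by simp; omega, ?_⟩
            have h1 : lo + (K - lo) = K := by omega
            simp [h1]
          have htrue := List.all_eq_true.mp hall _ hmemK
          have hfalse := pvTok_at_prefixLen t t[K] (List.getElem?_eq_getElem hKlen)
          rw [htrue] at hfalse
          exact Bool.noConfusion hfalse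
        rw [if_neg hnall]
        exact ih lo (mid - 1) hlo (by omega) (by omega) (by omega)
    · simp only [pvBSearch, if_neg hlh]; omega

/-- the characterisation of B: token prefix of the (clamped) tail. -/
theorem pvAlt_toList (codeStr : String) (startPos : Int) :
    (get_variable_string_alt codeStr startPos).toList =
      (PySem.List.slice codeStr.toList (some startPos) none).takeWhile pvIsTokenChar := by
  have htl : (PySem.Str.slice codeStr (some startPos) none).toList
      = PySem.List.slice codeStr.toList (some startPos) none := by
    rw [PySem.Str.toList_slice, PySem.Chars.slice_eq_listSlice]
  set t := (PySem.Str.slice codeStr (some startPos) none).toList with ht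
  have hK : (t.takeWhile pvIsTokenChar).length ≤ t.length :=
    (List.takeWhile_sublist _).length_le
  show (PySem.Str.slice (PySem.Str.slice codeStr (some startPos) none) none
      (some ((pvBSearch t t.length 0 t.length : Nat) : Int))).toList = _
  rw [pvBSearch_eq t t.length 0 t.length (by omega) hK (le_refl _) (by omega)]
  rw [PySem.Str.toList_slice, PySem.Chars.slice_eq_listSlice, PySem.List.slice_to_natCast, ← htl]
  exact (pvTakeWhile_take t).symm

/-- pointer form of A's result -/
theorem pvA_toList (codeStr : String) (startPos : Int) :
    (get_variable_string codeStr startPos).toList =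
      PySem.List.slice codeStr.toList (some startPos)
        (some (pvALoop codeStr.toList (((codeStr.toList.length : Int) - startPos).toNat) startPos)) := by
  unfold get_variable_string
  rw [PySem.Str.toList_slice, PySem.Chars.slice_eq_listSlice]
  have : PySem.Str.len codeStr = (codeStr.toList.length : Int) := by
    simp [PySem.Str.len_eq]
  rw [this]

theorem pvAll_alnum_iff (l : List Char) :
    l.all Char.isAlphanum = l.all pvIsTokenChar := by
  induction l with
  | nil => rfl
  | cons c cs ih => simp [List.all_cons, pvTok_eq_alnum, ih]

theorem pvTakeWhile_lt (l : List Char) (hna : ¬ (l.all pvIsTokenChar = true)) :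
    (l.takeWhile pvIsTokenChar).length < l.length := by
  rcases lt_or_eq_of_le ((List.takeWhile_sublist (l := l) pvIsTokenChar).length_le) with h | h
  · exact h
  · exfalso
    apply hna
    have : l.takeWhile pvIsTokenChar = l := by
      rw [pvTakeWhile_take l, h, List.take_length]
    rw [List.all_eq_true]
    intro x hx
    exact List.mem_takeWhile_imp (this ▸ hx)

theorem pvSlice_clamp (xs : List Char) (a b : Int) :
    PySem.List.slice xs (some a) (some b) =
      (xs.drop (PySem.List.clampIdx xs.length a)).take
        (PySem.List.clampIdx xs.length b - PySem.List.clampIdx xs.length a) := by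
  simp [PySem.List.slice]

theorem pvMain (codeStr : String) (startPos : Int)
    (hpre : -(codeStr.toList.length : Int) ≤ startPos)
    (hnd : ¬ D_get_variable_string codeStr startPos) :
    (get_variable_string codeStr startPos).toList = (get_variable_string_alt codeStr startPos).toList := by
  rw [pvA_toList, pvAlt_toList]
  set s := codeStr.toList with hs
  set n := s.length with hn
  rw [PySem.List.slice_some_none]
  rcases (by omega : 0 ≤ startPos ∨ startPos < 0) with hp | hp
  · -- nonnegative startPos
    obtain ⟨j, rfl⟩ : ∃ j : Nat, startPos = (j : Int) := ⟨startPos.toNat, by omega⟩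
    have hfuel : n ≤ j + (((n : Int) - (j : Int)).toNat) := by omega
    rw [pvALoop_nonneg s _ j hfuel]
    have hclamp : PySem.List.clampIdx n (j : Int) = min j n := PySem.List.clampIdx_natCast n j
    have hdropmin : s.drop (min j n) = s.drop j := by
      rcases (by omega : j ≤ n ∨ n < j) with h | h
      · rw [min_eq_left h]
      · rw [min_eq_right (le_of_lt h), List.drop_eq_nil_of_le (le_refl n),
          List.drop_eq_nil_of_le (le_of_lt h)]
    rw [hclamp, hdropmin, PySem.List.slice_natCast_add]
    exact (pvTakeWhile_take (s.drop j)).symm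
  · -- negative startPos
    obtain ⟨m, rfl⟩ : ∃ m : Nat, startPos = -(m : Int) := ⟨(-startPos).toNat, by omega⟩
    have hm : 0 < m := by omega
    have hmn : m ≤ n := by omega
    have hclamp : PySem.List.clampIdx n (-(m : Int)) = n - m :=
      PySem.List.clampIdx_neg_natCast n m hm
    rw [hclamp]
    by_cases hall : (s.drop (n - m)).all pvIsTokenChar = true
    · -- tail all token characters: the prefix must be all token too, else D_ holds
      have hsall : s.all pvIsTokenChar = true := by
        by_contra hns
        apply hnd
        refine ⟨by omega, by omega, ?_, ?_⟩
        · have : ((n : Int) + -(m : Int)).toNat = n - m := by omega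
          rw [← hs, ← hn, this, pvAll_alnum_iff]
          exact hall
        · rw [← hs, pvAll_alnum_iff]
          exact hns
      have hfuel : n + m ≤ ((n : Int) - -(m : Int)).toNat := by omega
      rw [pvALoop_neg_wrap s m hmn hall _ hfuel]
      have htwl : s.takeWhile pvIsTokenChar = s := List.takeWhile_eq_self_iff.mpr
        (by intro x hx; exact (List.all_eq_true.mp hsall) x hx)
      rw [htwl, ← hn, pvSlice_clamp, hclamp]
      have hcn : PySem.List.clampIdx n (n : Int) = n := by
        rw [PySem.List.clampIdx_natCast]; omega
      rw [hcn]
      have h1 : (s.drop (n - m)).take (n - (n - m)) = s.drop (n - m) := by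
        apply List.take_of_length_le
        rw [List.length_drop]
      rw [h1]
      exact (List.takeWhile_eq_self_iff.mpr
        (by intro x hx; exact (List.all_eq_true.mp hall) x hx)).symm
    · -- tail contains a non-token character: the loop stops while still negative
      have hfuel : m ≤ ((n : Int) - -(m : Int)).toNat := by omega
      rw [pvALoop_neg_stop s m hm hmn hall _ hfuel]
      set t := (s.drop (n - m)).takeWhile pvIsTokenChar with ht
      have htlen : t.length < m := by
        have h2 := pvTakeWhile_lt (s.drop (n - m)) hall
        rw [List.length_drop, ← ht] at h2
        omega
      have hk2 : -(m : Int) + (t.length : Int) = -(((m - t.length : Nat) : Int)) := by omega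
      rw [hk2, pvSlice_clamp, hclamp,
        PySem.List.clampIdx_neg_natCast n (m - t.length) (by omega)]
      have harith : n - (m - t.length) - (n - m) = t.length := by omega
      rw [harith]
      exact ((pvTakeWhile_take (s.drop (n - m))).symm)

theorem pvTight (codeStr : String) (startPos : Int)
    (hd : D_get_variable_string codeStr startPos) :
    get_variable_string codeStr startPos ≠ get_variable_string_alt codeStr startPos := by
  obtain ⟨hp, hpre, hall, hnp⟩ := hd
  set s := codeStr.toList with hs
  set n := s.length with hn
  obtain ⟨m, hps⟩ : ∃ m : Nat, startPos = -(m : Int) := ⟨(-startPos).toNat, by omega⟩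
  have hm : 0 < m := by omega
  have hmn : m ≤ n := by omega
  have hidx : ((n : Int) + startPos).toNat = n - m := by omega
  rw [hidx, pvAll_alnum_iff] at hall
  rw [pvAll_alnum_iff] at hnp
  have hnp' : ¬ ((s.take (n - m)).all pvIsTokenChar = true) := by
    intro htk
    apply hnp
    rw [← List.take_append_drop (n - m) s, List.all_append, htk, hall]
    rfl
  -- A's pointer wraps to the length of s's whole token prefix, which lies at or before n - m,
  -- so A's slice is empty
  have hfirst : (s.takeWhile pvIsTokenChar).length ≤ n - m := by
    by_contra hgt
    apply hnp'
    rw [List.all_eq_true]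
    intro x hx
    have hxw : x ∈ s.takeWhile pvIsTokenChar := by
      have h1 : s.take (n - m) = (s.takeWhile pvIsTokenChar).take (n - m) := by
        rw [pvTakeWhile_take s, List.take_take, min_eq_left (by omega)]
      rw [h1] at hx
      exact List.mem_of_mem_take hx
    exact List.mem_takeWhile_imp hxw
  have hAlist : (get_variable_string codeStr startPos).toList = [] := by
    rw [pvA_toList, ← hs, ← hn, hps]
    rw [pvALoop_neg_wrap s m hmn hall _ (by omega)]
    rw [pvSlice_clamp, PySem.List.clampIdx_neg_natCast n m hm, ← hn]
    have hcf : PySem.List.clampIdx n ((s.takeWhile pvIsTokenChar).length : Int) =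
        (s.takeWhile pvIsTokenChar).length := by
      rw [PySem.List.clampIdx_natCast]
      have := (List.takeWhile_sublist (l := s) pvIsTokenChar).length_le
      omega
    rw [hcf]
    have h0 : (s.takeWhile pvIsTokenChar).length - (n - m) = 0 := by omega
    rw [h0, List.take_zero]
  have htail : (s.drop (n - m)).takeWhile pvIsTokenChar = s.drop (n - m) :=
    List.takeWhile_eq_self_iff.mpr (by intro x hx; exact (List.all_eq_true.mp hall) x hx)
  have hBlist : (get_variable_string_alt codeStr startPos).toList = s.drop (n - m) := by
    rw [pvAlt_toList, ← hs, hps, PySem.List.slice_some_none, ← hn,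
      PySem.List.clampIdx_neg_natCast n m hm, htail]
  have hne : s.drop (n - m) ≠ [] := by
    apply List.ne_nil_of_length_pos
    rw [List.length_drop]
    omega
  intro heq
  have hlists := congrArg String.toList heq
  rw [hAlist, hBlist] at hlists
  exact hne hlists.symm

-- ===== VERDICT (by name: the statement is the Claim_ definition above) =====
theorem get_variable_string_spec : Claim_unchanged_get_variable_string := by
  intro codeStr startPos _ hpre hnd
  exact String.toList_inj.mp (pvMain codeStr startPos hpre hnd)

theorem get_variable_string_changed : Claim_changed_get_variable_string := by
  unfold Claim_changed_get_variable_string; decide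

theorem get_variable_string_tight : Claim_exact_get_variable_string := by
  intro codeStr startPos _ _ hd
  exact pvTight codeStr startPos hd
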